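-- pv_equiv track=rewrite | github.com/MasonBush/advent | 09/part2.py | getAvaliableSpace
-- ===== SOURCE A (Python) =====
-- def getAvaliableSpace(requiredSize, freeSpaces: dict[int, list[int]]):
--
-- 	sortedSpaces = {}
-- 	for size, spaces in freeSpaces.items():
-- 		if size < requiredSize:
-- 			continue
--
-- 		spaces.sort()
--
-- 		for i in spaces:
-- 			sortedSpaces[i] = size
--
-- 	keys = list(sortedSpaces.keys())
-- 	keys.sort()
--
-- 	sortedSpaces = {i: sortedSpaces[i] for i in keys}
--
-- 	if not sortedSpaces:
-- 		return
--
--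
-- 	index = list(sortedSpaces.keys())[0]
--
-- 	size = sortedSpaces[index]
-- 	return size, index
-- ===== SOURCE B (Python) =====
-- def getAvaliableSpace(requiredSize, freeSpaces: dict[int, list[int]]):
-- 	best = None
-- 	for size, spaces in freeSpaces.items():
-- 		if size < requiredSize:
-- 			continue
-- 		for i in spaces:
-- 			if best is None or i <= best[1]:
-- 				best = (size, i)
-- 	return best
-- ===== Notes on version B (the rewrite author's own statement) =====
-- stated objective: simpler
-- what changed: Replaces A's pipeline (per-size sort of index lists, index->size dict, sorting all keys, rebuilding a sorted dict, taking the first key) by a single linear pass over the dict entries that tracks the best (size, index) pair, using 'i <= best[1]' so a later qualifying entry overwrites the size at the minimal index exactly like A's dict last-write-wins; B also does not mutate its argument (A sorts the lists in place).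
import Mathlib
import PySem

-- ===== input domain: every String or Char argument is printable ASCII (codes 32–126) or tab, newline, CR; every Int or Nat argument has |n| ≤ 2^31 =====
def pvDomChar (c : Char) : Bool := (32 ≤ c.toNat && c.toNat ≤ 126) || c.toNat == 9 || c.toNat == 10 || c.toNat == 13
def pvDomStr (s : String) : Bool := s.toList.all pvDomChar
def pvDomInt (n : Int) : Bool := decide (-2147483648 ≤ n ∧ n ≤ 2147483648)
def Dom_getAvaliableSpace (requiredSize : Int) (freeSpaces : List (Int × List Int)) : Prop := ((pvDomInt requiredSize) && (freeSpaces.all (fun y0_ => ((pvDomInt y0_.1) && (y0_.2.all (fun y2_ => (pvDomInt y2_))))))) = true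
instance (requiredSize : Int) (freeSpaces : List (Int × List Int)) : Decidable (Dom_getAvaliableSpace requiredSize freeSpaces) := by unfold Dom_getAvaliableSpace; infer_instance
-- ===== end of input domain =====

-- B replaces A's build-a-dict / sort-all-indices / rebuild-sorted-dict pipeline by one
-- linear pass tracking the current best (size, index), with `i <= best[1]` reproducing the
-- dict's last-write-wins on the minimal index (objective: simpler — one short pass, no sorting).
-- A sorts each `spaces` list in place (observable mutation); B does not mutate its argument;
-- the equivalence proved here is about the return value only.

-- ===== PORT A =====
-- `freeSpaces` is a Python dict: both ports first form its entry list via PySem.Dict.ofList.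
def getAvaliableSpace (requiredSize : Int) (freeSpaces : List (Int × List Int)) : Option (Int × Int) :=
  let sortedSpaces : PySem.Dict Int Int :=
    (PySem.Dict.ofList freeSpaces).items.foldl
      (fun d p =>
        if p.1 < requiredSize then d
        else (PySem.List.sorted p.2 (fun x => x) false).foldl (fun d i => d.insert i p.1) d)
      PySem.Dict.empty
  let keys := PySem.List.sorted sortedSpaces.keys (fun x => x) false
  -- every i ∈ keys is a key of sortedSpaces, so Python's sortedSpaces[i] never raises; getD 0 is exact
  let sortedSpaces2 : PySem.Dict Int Int :=
    keys.foldl (fun d i => d.insert i (sortedSpaces.getD i 0)) PySem.Dict.empty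
  match sortedSpaces2.keys with
  | [] => none
  | k :: _ => some (sortedSpaces2.getD k 0, k)

-- ===== PORT B =====
def getAvaliableSpace_alt (requiredSize : Int) (freeSpaces : List (Int × List Int)) : Option (Int × Int) :=
  (PySem.Dict.ofList freeSpaces).items.foldl
    (fun best p =>
      if p.1 < requiredSize then best
      else p.2.foldl
        (fun best i =>
          match best with
          | none => some (p.1, i)
          | some b => if i ≤ b.2 then some (p.1, i) else some b)
        best)
    none

-- ===== PRECONDITION & SPEC =====
def Spec_getAvaliableSpace (requiredSize : Int) (freeSpaces : List (Int × List Int)) (out : Option (Int × Int)) : Prop := out = getAvaliableSpace_alt requiredSize freeSpaces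
instance (requiredSize : Int) (freeSpaces : List (Int × List Int)) (out : Option (Int × Int)) : Decidable (Spec_getAvaliableSpace requiredSize freeSpaces out) := by unfold Spec_getAvaliableSpace; infer_instance

-- ===== CLAIM (what is proved, stated in full; the proofs are below) =====
def Claim_equal_getAvaliableSpace : Prop := ∀ (requiredSize : Int) (freeSpaces : List (Int × List Int)), Dom_getAvaliableSpace requiredSize freeSpaces → Spec_getAvaliableSpace requiredSize freeSpaces (getAvaliableSpace requiredSize freeSpaces)

-- ===== LEMMAS AND PROOFS =====

-- The invariant tying A's dict to B's running best: best = none iff the dict is empty, and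
-- otherwise best = (v, m) with m the minimum key and v its stored value.
def pvInv (d : PySem.Dict Int Int) (best : Option (Int × Int)) : Prop :=
  match best with
  | none => d.keys = []
  | some b => b.2 ∈ d.keys ∧ (∀ k ∈ d.keys, b.2 ≤ k) ∧ d.getD b.2 0 = b.1

lemma pv_getD_insFold (l : List Int) (sz : Int) (d : PySem.Dict Int Int) (k : Int) :
    (l.foldl (fun d i => d.insert i sz) d).getD k 0 = if k ∈ l then sz else d.getD k 0 := by
  induction l generalizing d with
  | nil => simp
  | cons i t ih =>
    simp only [List.foldl_cons, ih, PySem.Dict.getD_insert, List.mem_cons]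
    by_cases hkt : k ∈ t <;> by_cases hki : k = i <;> simp [hkt, hki]

lemma pv_mem_keys_insFold (l : List Int) (sz : Int) (d : PySem.Dict Int Int) (k : Int) :
    k ∈ (l.foldl (fun d i => d.insert i sz) d).keys ↔ k ∈ l ∨ k ∈ d.keys := by
  induction l generalizing d with
  | nil => simp
  | cons i t ih =>
    simp only [List.foldl_cons, ih, PySem.Dict.mem_keys_insert, List.mem_cons]
    tauto

lemma pv_inv_one (sz i : Int) (d : PySem.Dict Int Int) (best : Option (Int × Int)) :
    pvInv d best →
    pvInv (d.insert i sz)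
      (match best with
       | none => some (sz, i)
       | some b => if i ≤ b.2 then some (sz, i) else some b) := by
  intro h
  match best with
  | none =>
    simp only [pvInv] at h ⊢
    refine ⟨by simp [PySem.Dict.mem_keys_insert], ?_, PySem.Dict.getD_insert_self d i sz 0⟩
    intro k hk
    rcases (PySem.Dict.mem_keys_insert d i k sz).1 hk with rfl | hk'
    · exact le_refl _
    · simp [h] at hk'
  | some b =>
    obtain ⟨hmem, hmin, hval⟩ := h
    by_cases hle : i ≤ b.2
    · simp only [pvInv, if_pos hle]
      refine ⟨by simp [PySem.Dict.mem_keys_insert], ?_, PySem.Dict.getD_insert_self d i sz 0⟩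
      intro k hk
      rcases (PySem.Dict.mem_keys_insert d i k sz).1 hk with rfl | hk'
      · exact le_refl _
      · exact le_trans hle (hmin k hk')
    · simp only [pvInv, if_neg hle]
      have hne : b.2 ≠ i := by intro he; exact hle (le_of_eq he.symm)
      refine ⟨by simp [PySem.Dict.mem_keys_insert, hmem], ?_, ?_⟩
      · intro k hk
        rcases (PySem.Dict.mem_keys_insert d i k sz).1 hk with rfl | hk'
        · omega
        · exact hmin k hk'
      · rw [PySem.Dict.getD_insert]
        simp [hne, hval]

lemma pv_inv_inner (sz : Int) (sp : List Int) :
    ∀ (d : PySem.Dict Int Int) (best : Option (Int × Int)), pvInv d best →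
    pvInv (sp.foldl (fun d i => d.insert i sz) d)
      (sp.foldl
        (fun best i =>
          match best with
          | none => some (sz, i)
          | some b => if i ≤ b.2 then some (sz, i) else some b)
        best) := by
  induction sp with
  | nil => intro d best h; exact h
  | cons i t ih =>
    intro d best h
    exact ih _ _ (pv_inv_one sz i d best h)

lemma pv_inv_transfer (d d' : PySem.Dict Int Int) (best : Option (Int × Int))
    (hkeys : ∀ k, k ∈ d.keys ↔ k ∈ d'.keys)
    (hgetD : ∀ k, d.getD k 0 = d'.getD k 0)
    (h : pvInv d best) : pvInv d' best := by
  match best with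
  | none =>
    simp only [pvInv] at h ⊢
    refine List.eq_nil_iff_forall_not_mem.2 ?_
    intro k hk
    have := (hkeys k).2 hk
    simp [h] at this
  | some b =>
    obtain ⟨hmem, hmin, hval⟩ := h
    exact ⟨(hkeys b.2).1 hmem, fun k hk => hmin k ((hkeys k).2 hk), (hgetD b.2).symm.trans hval⟩

lemma pv_inv_outer (requiredSize : Int) (L : List (Int × List Int)) :
    ∀ (d : PySem.Dict Int Int) (best : Option (Int × Int)), pvInv d best →
    pvInv
      (L.foldl
        (fun d p =>
          if p.1 < requiredSize then d
          else (PySem.List.sorted p.2 (fun x => x) false).foldl (fun d i => d.insert i p.1) d)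
        d)
      (L.foldl
        (fun best p =>
          if p.1 < requiredSize then best
          else p.2.foldl
            (fun best i =>
              match best with
              | none => some (p.1, i)
              | some b => if i ≤ b.2 then some (p.1, i) else some b)
            best)
        best) := by
  induction L with
  | nil => intro d best h; exact h
  | cons p t ih =>
    intro d best h
    simp only [List.foldl_cons]
    by_cases hp : p.1 < requiredSize
    · simp only [if_pos hp]; exact ih d best h
    · simp only [if_neg hp]
      refine ih _ _ ?_
      refine pv_inv_transfer _ _ _ ?_ ?_ (pv_inv_inner p.1 p.2 d best h)
      · intro k
        rw [pv_mem_keys_insFold, pv_mem_keys_insFold]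
        rw [PySem.List.mem_sorted p.2 (fun x => x) false k]
      · intro k
        rw [pv_getD_insFold, pv_getD_insFold]
        by_cases hk : k ∈ p.2 <;>
          simp [PySem.List.mem_sorted p.2 (fun x => x) false k, hk]

lemma pv_nodup_outer (requiredSize : Int) (L : List (Int × List Int)) :
    ∀ (d : PySem.Dict Int Int), d.keys.Nodup →
    (L.foldl
        (fun d p =>
          if p.1 < requiredSize then d
          else (PySem.List.sorted p.2 (fun x => x) false).foldl (fun d i => d.insert i p.1) d)
        d).keys.Nodup := by
  induction L with
  | nil => intro d h; exact h
  | cons p t ih =>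
    intro d h
    simp only [List.foldl_cons]
    by_cases hp : p.1 < requiredSize
    · simp only [if_pos hp]; exact ih d h
    · simp only [if_neg hp]
      exact ih _ (PySem.Dict.nodup_keys_foldl_insert _ (fun _ _ => p.1) d h)

lemma pv_final (d : PySem.Dict Int Int) (hn : d.keys.Nodup) (best : Option (Int × Int))
    (h : pvInv d best) :
    (match ((PySem.List.sorted d.keys (fun x => x) false).foldl
              (fun a i => a.insert i (d.getD i 0)) PySem.Dict.empty).keys with
     | [] => none
     | k :: _ => some ((((PySem.List.sorted d.keys (fun x => x) false).foldl
              (fun a i => a.insert i (d.getD i 0)) PySem.Dict.empty)).getD k 0, k)) = best := by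
  set l := PySem.List.sorted d.keys (fun x => x) false with hl
  have hlnd : l.Nodup := (PySem.List.sorted_perm d.keys (fun x => x) false).symm.nodup hn
  have hitems :
      (l.foldl (fun a i => a.insert i (d.getD i 0)) PySem.Dict.empty).items
        = l.map (fun i => (i, d.getD i 0)) := by
    have := PySem.Dict.items_foldl_insert_fresh (l := l) (k := fun i => i)
      (v := fun i => d.getD i 0) (d := PySem.Dict.empty)
      (by intro a _; simp) (by simpa using hlnd)
    simpa using this
  have hkeys :
      (l.foldl (fun a i => a.insert i (d.getD i 0)) PySem.Dict.empty).keys = l := by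
    simp only [PySem.Dict.keys, hitems, List.map_map]
    exact List.map_id' l
  match best with
  | none =>
    simp only [pvInv] at h
    have : l = [] := by rw [hl, h]; rfl
    rw [hkeys, this]
  | some b =>
    obtain ⟨hmem, hmin, hval⟩ := h
    have hlne : l ≠ [] := by
      intro hnil
      have : d.keys = [] :=
        (PySem.List.sorted_eq_nil_iff d.keys (fun x => x) false).1 (hl ▸ hnil)
      rw [this] at hmem; exact (List.not_mem_nil).elim hmem
    obtain ⟨k0, t, hcons⟩ := List.exists_cons_of_ne_nil hlne
    have hk0mem : k0 ∈ d.keys := by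
      have : k0 ∈ l := by rw [hcons]; exact List.mem_cons_self
      rw [hl] at this
      exact (PySem.List.mem_sorted d.keys (fun x => x) false k0).1 this
    have h1 : k0 ≤ b.2 :=
      PySem.List.key_head_sorted_le d.keys (fun x => x) (hl.symm.trans hcons) b.2 hmem
    have h2 : b.2 ≤ k0 := hmin k0 hk0mem
    have hk0 : k0 = b.2 := le_antisymm h1 h2
    have hgd :
        (l.foldl (fun a i => a.insert i (d.getD i 0)) PySem.Dict.empty).getD k0 0
          = d.getD k0 0 := by
      apply PySem.Dict.getD_of_mem_items
      · rw [hitems]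
        refine List.mem_map_of_mem ?_
        rw [hcons]; exact List.mem_cons_self
      · rw [hkeys]; exact hlnd
    rw [hcons] at hgd
    rw [hkeys, hcons]
    show some (((k0 :: t).foldl (fun a i => a.insert i (d.getD i 0)) PySem.Dict.empty).getD k0 0, k0)
      = some b
    rw [hgd, hk0, hval]

-- ===== VERDICT (by name: the statement is the Claim_ definition above) =====
theorem getAvaliableSpace_spec : Claim_equal_getAvaliableSpace := by
  intro requiredSize freeSpaces _
  show getAvaliableSpace requiredSize freeSpaces = getAvaliableSpace_alt requiredSize freeSpaces
  unfold getAvaliableSpace getAvaliableSpace_alt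
  have hinv := pv_inv_outer requiredSize (PySem.Dict.ofList freeSpaces).items
    PySem.Dict.empty none (by simp [pvInv])
  have hnd := pv_nodup_outer requiredSize (PySem.Dict.ofList freeSpaces).items
    PySem.Dict.empty (by simp)
  exact pv_final _ hnd _ hinv
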